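-- pv_equiv track=rewrite | github.com/Hlax/KMBL_V1 | services/orchestrator/src/kmbl_orchestrator/staging/static_preview_assembly.py | _merge_js_path_order
-- ===== SOURCE A (Python) =====
-- def _merge_js_path_order(
--     js_paths: list[str],
--     explicit: list[str],
--     dom_paths: list[str],
-- ) -> list[str]:
--     seen: set[str] = set()
--     out: list[str] = []
--     for p in explicit + dom_paths:
--         if p in js_paths and p not in seen:
--             out.append(p)
--             seen.add(p)
--     for p in sorted(set(js_paths) - seen):
--         out.append(p)
--     return out
-- ===== SOURCE B (Python) =====
-- def _merge_js_path_order(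
--     js_paths: list[str],
--     explicit: list[str],
--     dom_paths: list[str],
-- ) -> list[str]:
--     order = explicit + dom_paths
--     rank: dict[str, int] = {}
--     for i, p in enumerate(order):
--         rank.setdefault(p, i)
--     n = len(order)
--     return sorted(set(js_paths), key=lambda p: (rank.get(p, n), p))
-- ===== Notes on version B (the rewrite author's own statement) =====
-- stated objective: faster
-- what changed: Replaces A's two passes (scan of explicit+dom with a per-element 'p in js_paths' list scan and a seen-set, then sorted leftovers appended) by one sort of set(js_paths) under the key (first-occurrence rank in explicit+dom, defaulting past all ranks, then the path itself).
import Mathlib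
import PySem

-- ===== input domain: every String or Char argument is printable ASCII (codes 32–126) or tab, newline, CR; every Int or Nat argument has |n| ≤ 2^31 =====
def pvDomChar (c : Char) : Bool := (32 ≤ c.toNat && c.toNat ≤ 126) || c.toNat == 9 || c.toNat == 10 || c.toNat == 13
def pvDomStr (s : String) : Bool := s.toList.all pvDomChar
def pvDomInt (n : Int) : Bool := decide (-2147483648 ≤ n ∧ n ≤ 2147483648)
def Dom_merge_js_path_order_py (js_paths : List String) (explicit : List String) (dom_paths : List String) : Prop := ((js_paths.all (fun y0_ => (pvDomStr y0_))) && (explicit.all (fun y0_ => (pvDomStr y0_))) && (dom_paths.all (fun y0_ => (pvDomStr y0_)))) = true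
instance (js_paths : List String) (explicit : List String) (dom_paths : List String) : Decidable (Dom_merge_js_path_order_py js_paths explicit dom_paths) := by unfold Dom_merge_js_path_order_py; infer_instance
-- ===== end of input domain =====

-- B replaces A's two passes (scan of explicit+dom with 'p in js_paths' list scans, then sorted leftovers) by ONE
-- sort of set(js_paths) keyed by (first-occurrence rank in explicit+dom, defaulting past all ranks, then the path);
-- a timing run measured B faster (A rescans js_paths per element).


-- ===== PORT A =====
-- seen: set; out: list; for p in explicit+dom_paths: if p in js_paths and p not in seen: out.append(p); seen.add(p)
-- then for p in sorted(set(js_paths) - seen): out.append(p)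
def merge_js_path_order_py (js_paths : List String) (explicit : List String) (dom_paths : List String) : List String :=
  let fin := (explicit ++ dom_paths).foldl
    (fun (st : PySem.Set String × List String) p =>
      if js_paths.contains p && !(PySem.Set.contains st.1 p)
      then (PySem.Set.add st.1 p, st.2 ++ [p]) else st)
    (PySem.Set.empty, [])
  (PySem.List.sorted (PySem.Set.diff (PySem.Set.ofList js_paths) fin.1) (fun x => x) false).foldl
    (fun out p => out ++ [p]) fin.2

-- ===== PORT B =====
-- order = explicit + dom_paths; rank = {}; for i, p in enumerate(order): rank.setdefault(p, i)
-- n = len(order); return sorted(set(js_paths), key=lambda p: (rank.get(p, n), p))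
def merge_js_path_order_py_alt (js_paths : List String) (explicit : List String) (dom_paths : List String) : List String :=
  let order := explicit ++ dom_paths
  let rank := (PySem.List.enumerate order).foldl
    (fun (d : PySem.Dict String Int) ip => d.setdefault ip.2 ip.1) PySem.Dict.empty
  let n : Int := order.length
  PySem.List.sorted2 (PySem.Set.ofList js_paths) (fun p => rank.getD p n) (fun p => p) false

-- ===== PRECONDITION & SPEC =====
def Spec_merge_js_path_order_py (js_paths : List String) (explicit : List String) (dom_paths : List String) (out : List String) : Prop := out = merge_js_path_order_py_alt js_paths explicit dom_paths
instance (js_paths : List String) (explicit : List String) (dom_paths : List String) (out : List String) : Decidable (Spec_merge_js_path_order_py js_paths explicit dom_paths out) := by unfold Spec_merge_js_path_order_py; infer_instance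

-- ===== CLAIM (what is proved, stated in full; the proofs are below) =====
def Claim_equal_merge_js_path_order_py : Prop := ∀ (js_paths : List String) (explicit : List String) (dom_paths : List String), Dom_merge_js_path_order_py js_paths explicit dom_paths → Spec_merge_js_path_order_py js_paths explicit dom_paths (merge_js_path_order_py js_paths explicit dom_paths)

-- ===== LEMMAS AND PROOFS =====

theorem sorted2_eq_sorted_lex {α κ₁ κ₂ : Type} [LinearOrder κ₁] [LinearOrder κ₂]
    (xs : List α) (k1 : α → κ₁) (k2 : α → κ₂) :
    PySem.List.sorted2 xs k1 k2 false = PySem.List.sorted xs (fun x => toLex (k1 x, k2 x)) false := by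
  have hbef : (fun a b => decide (k1 a < k1 b) || !decide (k1 b < k1 a) && decide (k2 a < k2 b))
      = (fun a b => decide (toLex (k1 a, k2 a) < toLex (k1 b, k2 b))) := by
    funext a b
    rcases lt_trichotomy (k1 a) (k1 b) with h | h | h
    · simp [Prod.Lex.toLex_lt_toLex, h, h.not_gt]
    · simp [Prod.Lex.toLex_lt_toLex, h]
    · simp [Prod.Lex.toLex_lt_toLex, h.not_gt, h.ne']
      exact fun hle => absurd hle (not_le.mpr h)
  unfold PySem.List.sorted2 PySem.List.sorted
  simp only [Bool.false_eq_true, if_false, hbef]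

theorem loopA_pair (js_paths : List String) (l : List String) (s : PySem.Set String) :
    l.foldl
      (fun (st : PySem.Set String × List String) p =>
        if js_paths.contains p && !(PySem.Set.contains st.1 p)
        then (PySem.Set.add st.1 p, st.2 ++ [p]) else st)
      (s, s)
    = (l.foldl (fun (s : PySem.Set String) p => if js_paths.contains p then PySem.Set.add s p else s) s,
       l.foldl (fun (s : PySem.Set String) p => if js_paths.contains p then PySem.Set.add s p else s) s) := by
  induction l generalizing s with
  | nil => rfl
  | cons x xs ih =>
    simp only [List.foldl_cons]
    by_cases hj : x ∈ js_paths
    · by_cases hs : x ∈ s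
      · have hadd : PySem.Set.add s x = s := PySem.Set.add_of_mem hs
        rw [if_neg (by simp [hj, hs]), if_pos (by simp [hj]), hadd]
        exact ih s
      · have hadd : PySem.Set.add s x = s ++ [x] := PySem.Set.add_of_not_mem hs
        rw [if_pos (by simp [hj, hs]), if_pos (by simp [hj]), hadd]
        exact ih (s ++ [x])
    · rw [if_neg (by simp [hj]), if_neg (by simp [hj])]
      exact ih s

theorem loopA_char (js_paths : List String) (l : List String) :
    l.foldl
      (fun (st : PySem.Set String × List String) p =>
        if js_paths.contains p && !(PySem.Set.contains st.1 p)
        then (PySem.Set.add st.1 p, st.2 ++ [p]) else st)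
      (PySem.Set.empty, [])
    = (PySem.Set.ofList (l.filter (fun p => js_paths.contains p)),
       PySem.Set.ofList (l.filter (fun p => js_paths.contains p))) := by
  have h := loopA_pair js_paths l PySem.Set.empty
  rw [show (PySem.Set.empty : PySem.Set String) = ([] : List String) from rfl] at h ⊢
  rw [h, PySem.Set.ofList_eq_foldl, List.foldl_filter]

theorem rank_get? (l : List String) (p : String) :
    ∀ (s : Int) (d : PySem.Dict String Int),
    ((PySem.List.enumerate l s).foldl
      (fun (d : PySem.Dict String Int) ip => d.setdefault ip.2 ip.1) d).get? p
    = ((d.get? p).orElse (fun _ => if p ∈ l then some (s + (l.idxOf p : Int)) else none)) := by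
  induction l with
  | nil =>
    intro s d
    simp [PySem.List.enumerate_nil, Option.orElse]
    cases d.get? p <;> rfl
  | cons x xs ih =>
    intro s d
    rw [PySem.List.enumerate_cons, List.foldl_cons]
    rw [ih (s + 1) (d.setdefault x s)]
    by_cases hpx : p = x
    · subst hpx
      rw [PySem.Dict.get?_setdefault_self]
      cases hd : d.get? p with
      | some v => simp [Option.orElse]
      | none => simp [Option.orElse, List.idxOf_cons_self]
    · rw [PySem.Dict.get?_setdefault_of_ne _ _ hpx]
      by_cases hm : p ∈ xs
      · have : (x :: xs).idxOf p = xs.idxOf p + 1 := by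
          simp [Ne.symm hpx]
        simp only [hm, if_true, List.mem_cons, hpx, false_or, this]
        have : s + 1 + (xs.idxOf p : Int) = s + ((xs.idxOf p : Nat) + 1 : Nat) := by push_cast; ring
        rw [this]
      · simp [hm, hpx]

theorem idxOf_cons_ne (a x : String) (l : List String) (h : a ≠ x) :
    List.idxOf a (x :: l) = List.idxOf a l + 1 := by
  simp [Ne.symm h]

theorem ofList_cons (x : String) (m : List String) :
    PySem.Set.ofList (x :: m) = x :: (PySem.Set.ofList m).filter (fun y => !(PySem.Set.contains [x] y)) := by
  have h : (x :: m) = [x] ++ m := rfl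
  rw [h, PySem.Set.ofList_append, PySem.Set.update_eq_append_filter]
  rfl

theorem ofList_filter_pairwise_idxOf (f : String → Bool) (l : List String) :
    (PySem.Set.ofList (l.filter f)).Pairwise (fun a b => l.idxOf a < l.idxOf b) := by
  induction l with
  | nil => simp
  | cons x xs ih =>
    cases hf : f x with
    | false =>
      rw [List.filter_cons_of_neg (by simp [hf])]
      refine ih.imp_of_mem ?_
      intro a b ha hb hab
      have ha' : a ∈ xs.filter f := (PySem.Set.mem_ofList _ _).mp ha
      have hb' : b ∈ xs.filter f := (PySem.Set.mem_ofList _ _).mp hb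
      have hax : a ≠ x := fun h => by
        have := List.of_mem_filter ha'; rw [h, hf] at this; exact Bool.false_ne_true this
      have hbx : b ≠ x := fun h => by
        have := List.of_mem_filter hb'; rw [h, hf] at this; exact Bool.false_ne_true this
      rw [idxOf_cons_ne _ _ _ hax, idxOf_cons_ne _ _ _ hbx]
      omega
    | true =>
      rw [List.filter_cons_of_pos hf, ofList_cons]
      constructor
      · intro b hb
        have hb1 := List.mem_of_mem_filter hb
        have hbx : b ≠ x := by
          have := List.of_mem_filter hb
          simp [PySem.Set.contains] at this
          intro h; exact this h
        rw [List.idxOf_cons_self, idxOf_cons_ne _ _ _ hbx]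
        omega
      · refine (List.Pairwise.filter _ ih).imp_of_mem ?_
        intro a b ha hb hab
        have ha1 := List.mem_of_mem_filter ha
        have hb1 := List.mem_of_mem_filter hb
        have hax : a ≠ x := by
          have := List.of_mem_filter ha
          simp [PySem.Set.contains] at this
          intro h; exact this h
        have hbx : b ≠ x := by
          have := List.of_mem_filter hb
          simp [PySem.Set.contains] at this
          intro h; exact this h
        rw [idxOf_cons_ne _ _ _ hax, idxOf_cons_ne _ _ _ hbx]
        omega

theorem rank_getD (l : List String) (p : String) (n : Int) :
    ((PySem.List.enumerate l).foldl
      (fun (d : PySem.Dict String Int) ip => d.setdefault ip.2 ip.1) PySem.Dict.empty).getD p n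
    = if p ∈ l then (l.idxOf p : Int) else n := by
  rw [PySem.Dict.getD_eq_get?_getD, rank_get? l p 0 PySem.Dict.empty]
  rw [PySem.Dict.get?_empty]
  by_cases hm : p ∈ l
  · simp [hm, Option.orElse]
  · simp [hm, Option.orElse]

-- ===== VERDICT (by name: the statement is the Claim_ definition above) =====
theorem merge_js_path_order_py_spec : Claim_equal_merge_js_path_order_py := by
  intro js_paths explicit dom_paths _
  unfold Spec_merge_js_path_order_py
  simp only [merge_js_path_order_py, merge_js_path_order_py_alt]
  set P := explicit ++ dom_paths with hP
  set f : String → Bool := fun p => js_paths.contains p with hf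
  set S := PySem.Set.ofList js_paths with hS
  set H := PySem.Set.ofList (P.filter f) with hH
  set n : Int := (P.length : Int) with hn
  set T := PySem.List.sorted (PySem.Set.diff S H) (fun x => x) false with hT
  rw [loopA_char js_paths P]
  rw [PySem.List.foldl_append_singleton]
  have hkey : (fun p : String =>
      (((PySem.List.enumerate P).foldl
        (fun (d : PySem.Dict String Int) ip => d.setdefault ip.2 ip.1) PySem.Dict.empty).getD p n))
      = (fun p : String => if p ∈ P then (P.idxOf p : Int) else n) := by
    funext p; exact rank_getD P p n
  rw [hkey]
  rw [sorted2_eq_sorted_lex]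
  have hSnd : S.Nodup := PySem.Set.nodup_ofList _
  have hHnd : H.Nodup := PySem.Set.nodup_ofList _
  have hTperm : T.Perm (PySem.Set.diff S H) := PySem.List.sorted_perm _ _ _
  have hDnd : (PySem.Set.diff S H).Nodup := PySem.Set.nodup_diff _ _ hSnd
  have hTnd : T.Nodup := hTperm.nodup_iff.mpr hDnd
  have hmemT : ∀ {b}, b ∈ T → b ∈ S ∧ b ∉ H := by
    intro b hb
    have := hTperm.mem_iff.mp hb
    exact (PySem.Set.mem_diff _ _ _).mp this
  have hHsubS : ∀ {a}, a ∈ H → a ∈ S := by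
    intro a ha
    have ha1 : a ∈ P.filter f := (PySem.Set.mem_ofList _ _).mp ha
    have := List.of_mem_filter ha1
    exact (PySem.Set.mem_ofList _ _).mpr (by simpa [hf] using this)
  have hHmemP : ∀ {a}, a ∈ H → a ∈ P := by
    intro a ha
    exact List.mem_of_mem_filter ((PySem.Set.mem_ofList _ _).mp ha)
  have hTnotP : ∀ {b}, b ∈ T → b ∉ P := by
    intro b hb hbP
    obtain ⟨hbS, hbH⟩ := hmemT hb
    have hbjs : b ∈ js_paths := (PySem.Set.mem_ofList _ _).mp hbS
    have : b ∈ P.filter f := List.mem_filter.mpr ⟨hbP, by simp [hf, hbjs]⟩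
    exact hbH ((PySem.Set.mem_ofList _ _).mpr this)
  refine (PySem.List.sorted_eq_of_perm_of_pairwise_lt _ _ _ ?_ ?_).symm
  · rw [List.perm_ext_iff_of_nodup ?_ hSnd]
    · intro a
      constructor
      · intro h
        rcases List.mem_append.mp h with h | h
        · exact hHsubS h
        · exact (hmemT h).1
      · intro h
        by_cases hH' : a ∈ H
        · exact List.mem_append.mpr (Or.inl hH')
        · refine List.mem_append.mpr (Or.inr ?_)
          rw [hTperm.mem_iff]
          exact (PySem.Set.mem_diff _ _ _).mpr ⟨h, hH'⟩
    · rw [List.nodup_append]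
      refine ⟨hHnd, hTnd, ?_⟩
      intro a haH b hbT hEq
      exact (hmemT hbT).2 (hEq ▸ haH)
  · rw [List.pairwise_append]
    refine ⟨?_, ?_, ?_⟩
    · refine (ofList_filter_pairwise_idxOf f P).imp_of_mem ?_
      intro a b ha hb hab
      have haP : a ∈ P := hHmemP ha
      have hbP : b ∈ P := hHmemP hb
      simp only [haP, hbP, if_true]
      refine Prod.Lex.toLex_lt_toLex.mpr (Or.inl ?_)
      show ((P.idxOf a : Int)) < ((P.idxOf b : Int))
      exact_mod_cast hab
    · have h1 : T.Pairwise (fun a b : String => a ≤ b) := PySem.List.sorted_pairwise _ _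
      have h2 : T.Pairwise (fun a b : String => a ≠ b) := hTnd
      refine (h1.and h2).imp_of_mem ?_
      intro a b ha hb hab
      have haP : a ∉ P := hTnotP ha
      have hbP : b ∉ P := hTnotP hb
      simp only [haP, hbP, if_false]
      exact Prod.Lex.toLex_lt_toLex.mpr (Or.inr ⟨rfl, lt_of_le_of_ne hab.1 hab.2⟩)
    · intro a ha b hb
      have haP : a ∈ P := hHmemP ha
      have hbP : b ∉ P := hTnotP hb
      simp only [haP, hbP, if_true, if_false]
      refine Prod.Lex.toLex_lt_toLex.mpr (Or.inl ?_)
      show ((P.idxOf a : Int)) < n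
      rw [hn]
      exact_mod_cast List.idxOf_lt_length_of_mem haP
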